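-- pv_equiv track=rewrite | github.com/Yawn-Sean/Daily_CF_Problems | daily_problems/2025/02/0201/personal_submission/cf1137a_thirteen_sky.py | f
-- ===== SOURCE A (Python) =====
-- def f(g, n, m):
--     a = []
--     b = []
--     for i in range(n):
--         w = sorted(enumerate(g[i]), key=lambda x: x[1])
--         d = [(w[0][0], 1)]
--         for j in range(m - 1):
--             d.append((w[j + 1][0], d[-1][1] + (1 if w[j + 1][1] > w[j][1] else 0)))
--         b.append(d[-1][1])
--         x = [0]*m
--         for i, j in d:
--             x[i] = j
--         a.append(x)
--     return (a, b)
-- ===== SOURCE B (Python) =====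
-- def f(g, n, m):
--     a = []
--     b = []
--     for i in range(n):
--         row = g[i]
--         vals = sorted(set(row))
--         rank = {v: r for r, v in enumerate(vals, 1)}
--         a.append([rank[v] for v in row])
--         b.append(len(vals))
--     return (a, b)
-- ===== Notes on version B (the rewrite author's own statement) =====
-- stated objective: simpler
-- what changed: Per row, instead of A's stable sort of (index,value) pairs followed by a cumulative duplicate-aware counter and a scatter write-back, B sorts the distinct values once, builds a value-to-dense-rank dict, maps the row through it in original order, and takes b as the number of distinct values.
-- outside the precondition, e.g. on f([[1, 2, 5]], 1, 2): A returns ([[1, 2]], [2]), B returns ([[1, 2, 3]], [3])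
import Mathlib
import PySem

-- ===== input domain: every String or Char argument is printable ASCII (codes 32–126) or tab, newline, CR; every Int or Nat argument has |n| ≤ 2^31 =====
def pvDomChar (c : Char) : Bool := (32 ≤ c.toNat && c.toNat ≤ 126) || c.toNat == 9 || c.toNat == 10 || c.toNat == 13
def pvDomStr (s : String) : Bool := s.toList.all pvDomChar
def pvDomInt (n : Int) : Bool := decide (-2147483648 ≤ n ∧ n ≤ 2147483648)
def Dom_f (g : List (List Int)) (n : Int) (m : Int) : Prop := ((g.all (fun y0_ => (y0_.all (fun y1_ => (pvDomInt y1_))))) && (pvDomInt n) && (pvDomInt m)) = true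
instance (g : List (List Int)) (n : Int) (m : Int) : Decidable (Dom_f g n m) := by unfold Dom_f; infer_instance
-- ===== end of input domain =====

-- B replaces A's sort-of-(index,value)-pairs + cumulative counter + scatter with a
-- sorted-distinct-values → dense-rank dict and a direct per-row lookup pass (objective: simpler).

-- ===== PORT A =====
-- one iteration of A's outer loop body for row r (none = the Python raises)
def fRowA (r : List Int) (m : Int) : Option (List Int × Int) :=
  let w := PySem.List.sorted (PySem.List.enumerate r 0) (fun x => x.2) false
  match PySem.List.pyGet? w 0 with
  | none => none                         -- w[0] raises on an empty row
  | some w0 =>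
    let od := (PySem.List.pyRange 0 (m - 1) 1).foldl
      (fun (od : Option (List (Int × Int))) j =>
        od.bind fun d =>
          match PySem.List.pyGet? w (j + 1), PySem.List.pyGet? w j, PySem.List.pyGet? d (-1) with
          | some wj1, some wj, some dl =>
              some (d ++ [(wj1.1, dl.2 + (if wj1.2 > wj.2 then (1 : Int) else 0))])
          | _, _, _ => none)
      (some [(w0.1, (1 : Int))])
    od.bind fun d =>
      match PySem.List.pyGet? d (-1) with
      | none => none
      | some dl =>
        let ox := d.foldl (fun (ox : Option (List Int)) p =>
            ox.bind fun x => PySem.List.pySet? x p.1 p.2)   -- x[i] = j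
          (some (PySem.List.pyRepeat [(0 : Int)] m))        -- x = [0]*m
        ox.map fun x => (x, dl.2)

def f (g : List (List Int)) (n : Int) (m : Int) : List (List Int) × List Int :=
  ((PySem.List.pyRange 0 n 1).foldl
    (fun (acc : Option (List (List Int) × List Int)) i =>
      acc.bind fun ab =>
        (PySem.List.pyGet? g i).bind fun r =>       -- g[i]
          (fRowA r m).map fun p => (ab.1 ++ [p.1], ab.2 ++ [p.2]))
    (some ([], []))).getD ([], [])                  -- none only outside Pre_f (A raises)

-- ===== PORT B =====
-- one iteration of B's outer loop body for row r
def fRowB (r : List Int) : List Int × Int :=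
  let vals := PySem.List.sorted (PySem.Set.ofList r) (fun x => x) false
  let rank := (PySem.List.enumerate vals 1).foldl
      (fun (d : PySem.Dict Int Int) p => d.insert p.2 p.1) PySem.Dict.empty
  -- rank[v] never misses (v ∈ vals); getD 0 is exact on that domain
  (r.map fun v => rank.getD v 0, (vals.length : Int))

def f_alt (g : List (List Int)) (n : Int) (m : Int) : List (List Int) × List Int :=
  ((PySem.List.pyRange 0 n 1).foldl
    (fun (acc : Option (List (List Int) × List Int)) i =>
      acc.bind fun ab =>
        (PySem.List.pyGet? g i).map fun r =>        -- row = g[i]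
          let p := fRowB r
          (ab.1 ++ [p.1], ab.2 ++ [p.2]))
    (some ([], []))).getD ([], [])

-- ===== PRECONDITION & SPEC =====
-- Pre_f requires n ≤ len(g) and each of the first n rows to be nonempty with length exactly m:
-- outside that A raises (IndexError), except that when a row is LONGER than m A sometimes returns
-- after ranking only its m smallest elements — an artefact of its index bookkeeping that B,
-- which ranks the whole row, does not reproduce; such inputs are excluded.
def Pre_f (g : List (List Int)) (n : Int) (m : Int) : Prop :=
  n ≤ (g.length : Int) ∧
  ∀ i : Nat, i < n.toNat → ((g.getD i []).length : Int) = m ∧ g.getD i [] ≠ []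

instance (g : List (List Int)) (n : Int) (m : Int) : Decidable (Pre_f g n m) := by
  unfold Pre_f; infer_instance

def pvWitness_f : List (List Int) × Int × Int := ([[3, 1, 3], [2, 2, 5]], 2, 3)

def Spec_f (g : List (List Int)) (n : Int) (m : Int) (out : List (List Int) × List Int) : Prop := out = f_alt g n m
instance (g : List (List Int)) (n : Int) (m : Int) (out : List (List Int) × List Int) : Decidable (Spec_f g n m out) := by unfold Spec_f; infer_instance

-- ===== CLAIM (what is proved, stated in full; the proofs are below) =====
def Claim_equal_f : Prop := ∀ (g : List (List Int)) (n : Int) (m : Int), Dom_f g n m → Pre_f g n m → Spec_f g n m (f g n m)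

-- ===== LEMMAS AND PROOFS =====

-- proof-only abbreviations: w = A's sorted (index,value) pairs, vals = B's sorted distinct values
def wOf (r : List Int) : List (Int × Int) :=
  PySem.List.sorted (PySem.List.enumerate r 0) (fun x => x.2) false
def valsOf (r : List Int) : List Int :=
  PySem.List.sorted (PySem.Set.ofList r) (fun x => x) false
def wiF (r : List Int) (j : Nat) : Int := ((wOf r).getD j (0, 0)).1
def wvF (r : List Int) (j : Nat) : Int := ((wOf r).getD j (0, 0)).2
def cntF (r : List Int) (v : Int) : Int := ((valsOf r).countP (fun u => decide (u < v)) : Int)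
def rkF (r : List Int) (j : Nat) : Int := cntF r (wvF r j) + 1
def DOf (r : List Int) (k : Nat) : List (Int × Int) :=
  (List.range k).map (fun j => (wiF r j, rkF r j))

theorem length_wOf (r : List Int) : (wOf r).length = r.length := by
  simp [wOf, PySem.List.length_sorted, PySem.List.length_enumerate]

theorem mem_valsOf (r : List Int) (v : Int) : v ∈ valsOf r ↔ v ∈ r := by
  simp [valsOf, PySem.List.mem_sorted, PySem.Set.mem_ofList]

theorem pairwise_valsOf (r : List Int) : (valsOf r).Pairwise (· < ·) :=
  PySem.List.sorted_ofList_pairwise_lt r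

theorem nodup_valsOf (r : List Int) : (valsOf r).Nodup :=
  (pairwise_valsOf r).imp (fun h => ne_of_lt h)

theorem wv_mono (r : List Int) {p q : Nat} (hpq : p ≤ q) (hq : q < r.length) :
    wvF r p ≤ wvF r q := by
  have hq' : q < (wOf r).length := by rw [length_wOf]; exact hq
  have hp' : p < (wOf r).length := lt_of_le_of_lt hpq hq'
  have := PySem.List.key_sorted_getElem_mono (PySem.List.enumerate r 0) (fun x => x.2) hpq hq'
  unfold wvF
  rw [List.getD_eq_getElem _ _ hp', List.getD_eq_getElem _ _ hq']
  exact this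

theorem w_entry (r : List Int) {j : Nat} (hj : j < r.length) :
    ∃ k : Nat, k < r.length ∧ (wOf r).getD j (0, 0) = ((k : Int), r.getD k 0) := by
  have hj' : j < (wOf r).length := by rw [length_wOf]; exact hj
  have hm : (wOf r).getD j (0, 0) ∈ wOf r := by
    rw [List.getD_eq_getElem _ _ hj']; exact List.getElem_mem hj'
  rw [wOf, PySem.List.mem_sorted, PySem.List.mem_enumerate_iff] at hm
  obtain ⟨k, hk, he⟩ := hm
  refine ⟨k, hk, ?_⟩
  have he' : (wOf r).getD j (0, 0) = ((0 : Int) + (k : Int), r[k]) := he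
  rw [he', List.getD_eq_getElem _ _ hk]
  simp

theorem wv_mem (r : List Int) {j : Nat} (hj : j < r.length) : wvF r j ∈ r := by
  obtain ⟨k, hk, he⟩ := w_entry r hj
  unfold wvF; rw [he]
  rw [List.getD_eq_getElem _ _ hk]; exact List.getElem_mem hk

theorem exists_wv (r : List Int) {v : Int} (hv : v ∈ r) :
    ∃ j : Nat, j < r.length ∧ wvF r j = v := by
  obtain ⟨k, hk, he⟩ := List.mem_iff_getElem.mp hv
  have hmem : ((k : Int), v) ∈ wOf r := by
    rw [wOf, PySem.List.mem_sorted, PySem.List.mem_enumerate_iff]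
    exact ⟨k, hk, by simp [he]⟩
  obtain ⟨j, hj, hje⟩ := List.mem_iff_getElem.mp hmem
  refine ⟨j, by rw [← length_wOf r]; exact hj, ?_⟩
  unfold wvF
  rw [List.getD_eq_getElem _ _ hj, hje]

theorem exists_wi (r : List Int) {k : Nat} (hk : k < r.length) :
    ∃ j : Nat, j < r.length ∧ wiF r j = (k : Int) := by
  have hmem : ((k : Int), r.getD k 0) ∈ wOf r := by
    rw [wOf, PySem.List.mem_sorted, PySem.List.mem_enumerate_iff]
    exact ⟨k, hk, by simp [List.getElem?_eq_getElem hk, List.getD]⟩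
  obtain ⟨j, hj, hje⟩ := List.mem_iff_getElem.mp hmem
  refine ⟨j, by rw [← length_wOf r]; exact hj, ?_⟩
  unfold wiF; rw [List.getD_eq_getElem _ _ hj, hje]

theorem gap (r : List Int) {j : Nat} (hj : j + 1 < r.length) {u : Int} (hu : u ∈ r) :
    u ≤ wvF r j ∨ wvF r (j + 1) ≤ u := by
  obtain ⟨i, hi, he⟩ := exists_wv r hu
  rcases le_or_gt i j with h | h
  · exact Or.inl (he ▸ wv_mono r h (by omega))
  · exact Or.inr (he ▸ wv_mono r h hi)

theorem countP_lt_split (l : List Int) (a b : Int)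
    (h : ∀ u ∈ l, u < b ↔ (u < a ∨ u = a)) :
    l.countP (fun u => decide (u < b)) = l.countP (fun u => decide (u < a)) + l.count a := by
  induction l with
  | nil => simp
  | cons x t ih =>
    have hx := h x List.mem_cons_self
    have ih' := ih (fun u hu => h u (List.mem_cons_of_mem _ hu))
    simp only [List.countP_cons, List.count_cons, ih', beq_iff_eq, decide_eq_true_eq]
    split_ifs <;> omega

theorem countP_lt_top (l : List Int) (a : Int) (h : ∀ u ∈ l, u < a ↔ u ≠ a) :
    l.countP (fun u => decide (u < a)) + l.count a = l.length := by
  induction l with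
  | nil => simp
  | cons x t ih =>
    have hx := h x List.mem_cons_self
    have ih' := ih (fun u hu => h u (List.mem_cons_of_mem _ hu))
    simp only [List.countP_cons, List.count_cons, List.length_cons, beq_iff_eq,
      decide_eq_true_eq]
    have hxx : ¬(x ≠ x) := fun hc => hc rfl
    split_ifs <;> omega

theorem cnt_base (r : List Int) : cntF r (wvF r 0) = 0 := by
  unfold cntF
  have : (valsOf r).countP (fun u => decide (u < wvF r 0)) = 0 := by
    rw [List.countP_eq_zero]
    intro u hu
    obtain ⟨i, hi, he⟩ := exists_wv r ((mem_valsOf r u).mp hu)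
    have : wvF r 0 ≤ u := he ▸ wv_mono r (Nat.zero_le i) hi
    simpa using not_lt.mpr this
  rw [this]; rfl

theorem count_vals_one (r : List Int) {v : Int} (hv : v ∈ r) : (valsOf r).count v = 1 :=
  List.count_eq_one_of_mem (nodup_valsOf r) ((mem_valsOf r v).mpr hv)

theorem cnt_step (r : List Int) {j : Nat} (hj : j + 1 < r.length) :
    cntF r (wvF r (j + 1)) = cntF r (wvF r j) + (if wvF r j < wvF r (j + 1) then (1 : Int) else 0) := by
  have hjlen : j < r.length := by omega
  have hle : wvF r j ≤ wvF r (j + 1) := wv_mono r (by omega) hj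
  by_cases hlt : wvF r j < wvF r (j + 1)
  · have hsplit := countP_lt_split (valsOf r) (wvF r j) (wvF r (j + 1)) ?_
    · have hcount := count_vals_one r (wv_mem r hjlen)
      unfold cntF
      rw [hsplit, hcount]
      push_cast
      simp [hlt]
    · intro u hu
      rcases gap r hj ((mem_valsOf r u).mp hu) with h | h
      · constructor
        · intro _; rcases lt_or_eq_of_le h with h' | h'
          · exact Or.inl h'
          · exact Or.inr h'
        · intro _; exact lt_of_le_of_lt h hlt
      · constructor
        · intro hub; omega
        · intro hua; omega
  · have heq : wvF r (j + 1) = wvF r j := le_antisymm (not_lt.mp hlt) hle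
    rw [heq]; simp

theorem cnt_top (r : List Int) (h0 : 0 < r.length) :
    cntF r (wvF r (r.length - 1)) + 1 = ((valsOf r).length : Int) := by
  have hlast : r.length - 1 < r.length := by omega
  have hmem : wvF r (r.length - 1) ∈ r := wv_mem r hlast
  have htop := countP_lt_top (valsOf r) (wvF r (r.length - 1)) ?_
  · have hcount := count_vals_one r hmem
    unfold cntF
    rw [hcount] at htop
    omega
  · intro u hu
    obtain ⟨i, hi, he⟩ := exists_wv r ((mem_valsOf r u).mp hu)
    have hle : u ≤ wvF r (r.length - 1) := he ▸ wv_mono r (by omega) hlast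
    constructor
    · intro h; omega
    · intro h; omega

-- B's rank dict: lookup of a key not among the inserted values is unchanged
theorem dict_fold_not_mem (l : List Int) (s : Int) (d : PySem.Dict Int Int) (v : Int)
    (hv : v ∉ l) :
    ((PySem.List.enumerate l s).foldl (fun d p => d.insert p.2 p.1) d).getD v 0 = d.getD v 0 := by
  induction l generalizing s d with
  | nil => rfl
  | cons a t ih =>
    rw [PySem.List.enumerate_cons]
    simp only [List.foldl_cons]
    rw [ih _ _ (fun h => hv (List.mem_cons_of_mem _ h))]
    exact PySem.Dict.getD_insert_of_ne _ _ _ (fun h => hv (h ▸ List.mem_cons_self))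

-- B's rank dict: looking up v gives s + (number of inserted values < v)
theorem dict_fold_lookup (l : List Int) (s : Int) (d : PySem.Dict Int Int) (v : Int)
    (hp : l.Pairwise (· < ·)) (hv : v ∈ l) :
    ((PySem.List.enumerate l s).foldl (fun d p => d.insert p.2 p.1) d).getD v 0
      = s + ((l.countP (fun u => decide (u < v)) : Nat) : Int) := by
  induction l generalizing s d with
  | nil => cases hv
  | cons a t ih =>
    rw [PySem.List.enumerate_cons]
    simp only [List.foldl_cons]
    have hhead : ∀ u ∈ t, a < u := fun u hu => List.rel_of_pairwise_cons hp hu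
    rcases List.mem_cons.mp hv with rfl | hvt
    · have hnot : v ∉ t := fun h => absurd (hhead _ h) (lt_irrefl v)
      rw [dict_fold_not_mem _ _ _ _ hnot, PySem.Dict.getD_insert_self]
      have : (v :: t).countP (fun u => decide (u < v)) = 0 := by
        rw [List.countP_eq_zero]
        intro u hu
        rcases List.mem_cons.mp hu with rfl | hut
        · simp
        · simpa using not_lt.mpr (le_of_lt (hhead _ hut))
      rw [this]; simp
    · have hav : a < v := hhead _ hvt
      rw [ih _ _ hp.of_cons hvt]
      have : (a :: t).countP (fun u => decide (u < v))
          = t.countP (fun u => decide (u < v)) + 1 := by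
        simp [hav]
      rw [this]; push_cast; ring

theorem rank_lookup (r : List Int) {v : Int} (hv : v ∈ r) :
    ((PySem.List.enumerate (valsOf r) 1).foldl
        (fun (d : PySem.Dict Int Int) p => d.insert p.2 p.1) PySem.Dict.empty).getD v 0
      = cntF r v + 1 := by
  rw [dict_fold_lookup _ _ _ _ (pairwise_valsOf r) ((mem_valsOf r v).mpr hv)]
  unfold cntF; ring

-- A's scatter loop: total version and its pointwise characterisation
theorem scatter_length (ps : List (Int × Int)) (init : List Int) :
    (ps.foldl (fun x p => PySem.List.pySetD x p.1 p.2) init).length = init.length := by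
  induction ps generalizing init with
  | nil => rfl
  | cons p t ih => simp only [List.foldl_cons]; rw [ih, PySem.List.length_pySetD]

theorem pySet?_eq (l : List Int) (i : Int) (v : Int) (h1 : 0 ≤ i) (h2 : i < (l.length : Int)) :
    PySem.List.pySet? l i v = some (PySem.List.pySetD l i v) := by
  rw [show i = ((i.toNat : Nat) : Int) by omega]
  rw [PySem.List.pySet?_natCast l i.toNat v (by omega)]
  rw [PySem.List.pySetD_of_nonneg l v (by omega)]
  simp
  congr 1
  omega

theorem scatter_option (ps : List (Int × Int)) (init : List Int)
    (h : ∀ p ∈ ps, 0 ≤ p.1 ∧ p.1 < (init.length : Int)) :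
    ps.foldl (fun ox p => ox.bind fun x => PySem.List.pySet? x p.1 p.2) (some init)
      = some (ps.foldl (fun x p => PySem.List.pySetD x p.1 p.2) init) := by
  induction ps generalizing init with
  | nil => rfl
  | cons p t ih =>
    have hp := h p List.mem_cons_self
    simp only [List.foldl_cons]
    rw [show ((some init).bind fun x => PySem.List.pySet? x p.1 p.2)
        = PySem.List.pySet? init p.1 p.2 from rfl]
    rw [pySet?_eq init p.1 p.2 hp.1 hp.2]
    exact ih _ (fun q hq => by
      rw [PySem.List.length_pySetD]
      exact h q (List.mem_cons_of_mem _ hq))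

theorem scatter_getD (ps : List (Int × Int)) (init : List Int) (k : Nat)
    (hps : ∀ p ∈ ps, 0 ≤ p.1) (hk : k < init.length) :
    (ps.foldl (fun x p => PySem.List.pySetD x p.1 p.2) init).getD k 0
      = match ps.reverse.find? (fun p => p.1 == (k : Int)) with
        | some p => p.2
        | none => init.getD k 0 := by
  induction ps generalizing init with
  | nil => simp
  | cons p t ih =>
    simp only [List.foldl_cons, List.reverse_cons]
    rw [ih _ (fun q hq => hps q (List.mem_cons_of_mem _ hq))
        (by rw [PySem.List.length_pySetD]; exact hk)]
    rw [List.find?_append]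
    cases hfind : t.reverse.find? (fun q => q.1 == (k : Int)) with
    | some q => simp
    | none =>
      simp only [Option.none_or]
      have hp0 := hps p List.mem_cons_self
      rw [PySem.List.pySetD_of_nonneg init p.2 hp0]
      by_cases hpk : p.1 = (k : Int)
      · have ht : p.1.toNat = k := by omega
        simp [hpk, List.getD, hk]
      · have ht : p.1.toNat ≠ k := by omega
        simp [hpk, List.getD, ht]

theorem DOf_succ (r : List Int) (k : Nat) :
    DOf r (k + 1) = DOf r k ++ [(wiF r k, rkF r k)] := by
  simp [DOf, List.range_succ]

theorem mem_DOf (r : List Int) (M : Nat) {p : Int × Int} (hp : p ∈ DOf r M) :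
    ∃ j : Nat, j < M ∧ p = (wiF r j, rkF r j) := by
  simp only [DOf, List.mem_map, List.mem_range] at hp
  obtain ⟨j, hj, he⟩ := hp
  exact ⟨j, hj, he.symm⟩

theorem pyGet?_wOf (r : List Int) (j : Nat) (hj : j < r.length) :
    PySem.List.pyGet? (wOf r) (j : Int) = some ((wOf r).getD j (0, 0)) := by
  have hj' : j < (wOf r).length := by rw [length_wOf]; exact hj
  rw [PySem.List.pyGet?_natCast, List.getElem?_eq_getElem hj', List.getD_eq_getElem _ _ hj']

theorem inner_fold (r : List Int) (t : Nat) (ht : t < r.length) :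
    (PySem.List.pyRange 0 (t : Int) 1).foldl
      (fun (od : Option (List (Int × Int))) j =>
        od.bind fun d =>
          match PySem.List.pyGet? (wOf r) (j + 1), PySem.List.pyGet? (wOf r) j,
              PySem.List.pyGet? d (-1) with
          | some wj1, some wj, some dl =>
              some (d ++ [(wj1.1, dl.2 + (if wj1.2 > wj.2 then (1 : Int) else 0))])
          | _, _, _ => none)
      (some (DOf r 1)) = some (DOf r (t + 1)) := by
  induction t with
  | zero => rfl
  | succ t ih =>
    have ht' : t < r.length := by omega
    rw [show (((t + 1 : Nat) : Int)) = ((t : Nat) : Int) + 1 by push_cast; ring]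
    rw [PySem.List.pyRange_one_succ_right (by positivity)]
    rw [List.foldl_append, ih ht']
    simp only [List.foldl_cons, List.foldl_nil]
    have h1 : PySem.List.pyGet? (wOf r) (((t : Nat) : Int) + 1)
        = some ((wOf r).getD (t + 1) (0, 0)) := by
      rw [show (((t : Nat) : Int) + 1) = (((t + 1 : Nat) : Nat) : Int) by push_cast; ring]
      exact pyGet?_wOf r (t + 1) ht
    have h2 : PySem.List.pyGet? (wOf r) ((t : Nat) : Int) = some ((wOf r).getD t (0, 0)) :=
      pyGet?_wOf r t ht'
    have h3 : PySem.List.pyGet? (DOf r (t + 1)) (-1) = some (wiF r t, rkF r t) := by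
      rw [DOf_succ, PySem.List.pyGet?_neg_one_append_singleton]
    rw [Option.bind_some, h1, h2, h3]
    rw [DOf_succ r (t + 1)]
    have hstep : rkF r t
        + (if ((wOf r).getD (t+1) (0,0)).2 > ((wOf r).getD t (0,0)).2 then (1:Int) else 0)
        = rkF r (t + 1) := by
      unfold rkF
      rw [cnt_step r ht]
      unfold wvF
      simp only [gt_iff_lt]
      ring
    show some (DOf r (t + 1) ++ [(wiF r (t + 1),
        rkF r t + (if ((wOf r).getD (t+1) (0,0)).2 > ((wOf r).getD t (0,0)).2 then (1:Int) else 0))])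
      = some (DOf r (t + 1) ++ [(wiF r (t + 1), rkF r (t + 1))])
    rw [hstep]

theorem DOf_find (r : List Int) (k : Nat) (hk : k < r.length) :
    ∃ p, (DOf r r.length).reverse.find? (fun p => p.1 == (k : Int)) = some p ∧
      p.2 = cntF r (r.getD k 0) + 1 := by
  obtain ⟨j0, hj0, hw0⟩ := exists_wi r hk
  have hex : ∃ x ∈ (DOf r r.length).reverse, (fun p : Int × Int => p.1 == (k : Int)) x = true := by
    refine ⟨(wiF r j0, rkF r j0), ?_, by simp [hw0]⟩
    rw [List.mem_reverse]
    simp only [DOf, List.mem_map, List.mem_range]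
    exact ⟨j0, hj0, rfl⟩
  obtain ⟨p, hfind⟩ := Option.isSome_iff_exists.mp (List.find?_isSome.mpr hex)
  refine ⟨p, hfind, ?_⟩
  have hp1 : p.1 = (k : Int) := by simpa using List.find?_some hfind
  have hpm : p ∈ DOf r r.length := List.mem_reverse.mp (List.mem_of_find?_eq_some hfind)
  obtain ⟨j, hj, rfl⟩ := mem_DOf r _ hpm
  obtain ⟨k', hk', he⟩ := w_entry r hj
  have hik : ((k' : Nat) : Int) = (k : Int) := by
    have : wiF r j = ((k' : Nat) : Int) := by unfold wiF; rw [he]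
    rw [← this]; exact hp1
  have hkk : k' = k := by omega
  show rkF r j = cntF r (r.getD k 0) + 1
  unfold rkF wvF
  rw [he, hkk]

theorem rowEq (r : List Int) (hr : r ≠ []) : fRowA r (r.length : Int) = some (fRowB r) := by
  have hM : 0 < r.length := List.length_pos_of_ne_nil hr
  unfold fRowA
  simp only []
  rw [show PySem.List.sorted (PySem.List.enumerate r 0) (fun x => x.2) false = wOf r from rfl]
  have h0 : PySem.List.pyGet? (wOf r) (0 : Int) = some ((wOf r).getD 0 (0, 0)) := by
    have := pyGet?_wOf r 0 hM
    simpa using this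
  rw [h0]
  show ((List.foldl
      (fun (od : Option (List (Int × Int))) j =>
        od.bind fun d =>
          match PySem.List.pyGet? (wOf r) (j + 1), PySem.List.pyGet? (wOf r) j,
              PySem.List.pyGet? d (-1) with
          | some wj1, some wj, some dl =>
              some (d ++ [(wj1.1, dl.2 + (if wj1.2 > wj.2 then (1 : Int) else 0))])
          | _, _, _ => none)
      (some [(((wOf r).getD 0 (0, 0)).1, (1 : Int))])
      (PySem.List.pyRange 0 ((r.length : Int) - 1) 1)).bind
    fun a =>
      match PySem.List.pyGet? a (-1) with
      | none => none
      | some dl =>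
        Option.map (fun x => (x, dl.2))
          (List.foldl (fun ox p => ox.bind fun x => PySem.List.pySet? x p.1 p.2)
            (some (PySem.List.pyRepeat [(0 : Int)] (r.length : Int))) a)) = some (fRowB r)
  have hD1 : [(((wOf r).getD 0 (0, 0)).1, (1 : Int))] = DOf r 1 := by
    have hrk0 : rkF r 0 = 1 := by unfold rkF; rw [cnt_base r]; ring
    simp [DOf, wiF, hrk0]
  rw [hD1]
  rw [show (r.length : Int) - 1 = ((r.length - 1 : Nat) : Int) by omega]
  rw [inner_fold r (r.length - 1) (by omega)]
  rw [Nat.sub_add_cancel hM]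
  rw [Option.bind_some]
  have hsplit : DOf r r.length = DOf r (r.length - 1) ++ [(wiF r (r.length - 1), rkF r (r.length - 1))] := by
    conv_lhs => rw [show r.length = (r.length - 1) + 1 by omega]
    exact DOf_succ r (r.length - 1)
  have hlast : PySem.List.pyGet? (DOf r r.length) (-1)
      = some (wiF r (r.length - 1), rkF r (r.length - 1)) := by
    rw [hsplit, PySem.List.pyGet?_neg_one_append_singleton]
  rw [hlast]
  have hinit : PySem.List.pyRepeat [(0 : Int)] (r.length : Int) = List.replicate r.length (0 : Int) := by
    rw [PySem.List.pyRepeat_singleton]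
    simp
  rw [hinit]
  have hbounds : ∀ p ∈ DOf r r.length, 0 ≤ p.1 ∧ p.1 < ((List.replicate r.length (0 : Int)).length : Int) := by
    intro p hp
    obtain ⟨j, hj, rfl⟩ := mem_DOf r _ hp
    obtain ⟨k', hk', he⟩ := w_entry r hj
    have : wiF r j = ((k' : Nat) : Int) := by unfold wiF; rw [he]
    rw [List.length_replicate]
    show 0 ≤ wiF r j ∧ wiF r j < (r.length : Int)
    rw [this]
    exact ⟨by positivity, by exact_mod_cast hk'⟩

  rw [scatter_option _ _ hbounds]
  have hfst : (DOf r r.length).foldl (fun x p => PySem.List.pySetD x p.1 p.2)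
        (List.replicate r.length (0 : Int))
      = r.map (fun v => cntF r v + 1) := by
    apply List.ext_getElem
    · rw [scatter_length, List.length_replicate, List.length_map]
    · intro k h1 h2
      have hkr : k < r.length := by simpa using h2
      have hkrep : k < (List.replicate r.length (0 : Int)).length := by
        rw [List.length_replicate]; exact hkr
      rw [← List.getD_eq_getElem _ (0 : Int) h1]
      rw [scatter_getD _ _ k (fun p hp => (hbounds p hp).1) hkrep]
      obtain ⟨p, hfind, hval⟩ := DOf_find r k hkr
      rw [hfind]
      show p.2 = (r.map (fun v => cntF r v + 1))[k]
      rw [hval, List.getElem_map]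
      rw [List.getD_eq_getElem _ _ hkr]
  rw [hfst]
  have hsnd : rkF r (r.length - 1) = ((valsOf r).length : Int) := by
    unfold rkF
    exact cnt_top r hM
  unfold fRowB
  rw [show PySem.List.sorted (PySem.Set.ofList r) (fun x => x) false = valsOf r from rfl]
  show some (r.map (fun v => cntF r v + 1), rkF r (r.length - 1)) = _
  rw [hsnd]
  refine congrArg some (Prod.ext ?_ rfl)
  show r.map (fun v => cntF r v + 1) = r.map (fun v => _)
  apply List.map_congr_left
  intro v hv
  rw [rank_lookup r hv]

theorem outer (g : List (List Int)) (m : Int) (N : Nat) (hN : N ≤ g.length)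
    (hrows : ∀ i : Nat, i < N → ((g.getD i []).length : Int) = m ∧ g.getD i [] ≠ []) :
    (PySem.List.pyRange 0 (N : Int) 1).foldl
      (fun (acc : Option (List (List Int) × List Int)) i =>
        acc.bind fun ab =>
          (PySem.List.pyGet? g i).bind fun r =>
            (fRowA r m).map fun p => (ab.1 ++ [p.1], ab.2 ++ [p.2]))
      (some ([], []))
    = (PySem.List.pyRange 0 (N : Int) 1).foldl
      (fun (acc : Option (List (List Int) × List Int)) i =>
        acc.bind fun ab =>
          (PySem.List.pyGet? g i).map fun r =>
            let p := fRowB r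
            (ab.1 ++ [p.1], ab.2 ++ [p.2]))
      (some ([], [])) := by
  induction N with
  | zero => rfl
  | succ N ih =>
    have hN' : N ≤ g.length := by omega
    have hNg : N < g.length := by omega
    rw [show (((N + 1 : Nat) : Int)) = ((N : Nat) : Int) + 1 by push_cast; ring]
    rw [PySem.List.pyRange_one_succ_right (by positivity)]
    rw [List.foldl_append, List.foldl_append]
    rw [ih hN' (fun i hi => hrows i (by omega))]
    have hg : PySem.List.pyGet? g ((N : Nat) : Int) = some (g.getD N []) := by
      rw [PySem.List.pyGet?_natCast, List.getElem?_eq_getElem hNg, List.getD_eq_getElem _ _ hNg]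
    have hrow := hrows N (by omega)
    have hA : fRowA (g.getD N []) m = some (fRowB (g.getD N [])) := by
      rw [← hrow.1]
      exact rowEq _ hrow.2
    cases hst : (PySem.List.pyRange 0 ((N : Nat) : Int) 1).foldl
        (fun (acc : Option (List (List Int) × List Int)) i =>
          acc.bind fun ab =>
            (PySem.List.pyGet? g i).map fun r =>
              let p := fRowB r
              (ab.1 ++ [p.1], ab.2 ++ [p.2]))
        (some ([], [])) with
    | none => rfl
    | some ab =>
      simp only [List.foldl_cons, List.foldl_nil, Option.bind_some]
      rw [hg]
      simp only [Option.bind_some, Option.map_some]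
      rw [hA]
      rfl

-- ===== VERDICT (by name: the statement is the Claim_ definition above) =====
theorem f_spec : Claim_equal_f := by
  intro g n m _ hpre
  obtain ⟨hlen, hrows⟩ := hpre
  unfold Spec_f f f_alt
  have hr : PySem.List.pyRange 0 n 1 = PySem.List.pyRange 0 ((n.toNat : Nat) : Int) 1 := by
    rcases le_or_gt 0 n with h | h
    · rw [Int.toNat_of_nonneg h]
    · rw [show n.toNat = 0 by omega]
      simp [PySem.List.pyRange, show ¬ 0 < n by omega]
  rw [hr]
  rw [outer g m n.toNat (by omega) hrows]
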